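-- pv_equiv track=rewrite | github.com/Thalaivar/DDP | B-SOID/analysis.py | idx_2_behaviour
-- ===== SOURCE A (Python) =====
-- BEHAVIOUR_LABELS = {
--     'Groom': [0, 1, 2, 3, 5, 9],
--     'Run': [6],
--     'Walk': [8, 18],
--     'CW-Turn': [7],
--     'CCW-Turn': [10, 11],
--     'Point': [12, 19],
--     'Rear': [13, 15, 17],
--     'N/A': [4, 14, 16]
-- }
--
-- def idx_2_behaviour(idx, diff=False):
--     for behaviour, idxs in BEHAVIOUR_LABELS.items():
--         if not diff:
--             if idx in idxs:
--                 return behaviour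
--         else:
--             for i, j in enumerate(idxs):
--                 if idx == j:
--                     return f'{behaviour} #{i}'
--
--     return None
-- ===== SOURCE B (Python) =====
-- BEHAVIOUR_LABELS = {
--     'Groom': [0, 1, 2, 3, 5, 9],
--     'Run': [6],
--     'Walk': [8, 18],
--     'CW-Turn': [7],
--     'CCW-Turn': [10, 11],
--     'Point': [12, 19],
--     'Rear': [13, 15, 17],
--     'N/A': [4, 14, 16]
-- }
--
-- # Reverse map precomputed once at module load: index -> (behaviour, position).
-- REVERSE = {j: (behaviour, i)
--            for behaviour, idxs in BEHAVIOUR_LABELS.items()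
--            for i, j in enumerate(idxs)}
--
-- def idx_2_behaviour(idx, diff=False):
--     hit = REVERSE.get(idx)
--     if hit is None:
--         return None
--     behaviour, i = hit
--     return f'{behaviour} #{i}' if diff else behaviour
-- ===== Notes on version B (the rewrite author's own statement) =====
-- stated objective: idiomatic
-- what changed: Replaces the per-call scan over BEHAVIOUR_LABELS (with an inner enumerate loop) by a module-level precomputed reverse dictionary index -> (behaviour, position), so each call is a single dict lookup with no runtime loops.
import Mathlib
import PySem

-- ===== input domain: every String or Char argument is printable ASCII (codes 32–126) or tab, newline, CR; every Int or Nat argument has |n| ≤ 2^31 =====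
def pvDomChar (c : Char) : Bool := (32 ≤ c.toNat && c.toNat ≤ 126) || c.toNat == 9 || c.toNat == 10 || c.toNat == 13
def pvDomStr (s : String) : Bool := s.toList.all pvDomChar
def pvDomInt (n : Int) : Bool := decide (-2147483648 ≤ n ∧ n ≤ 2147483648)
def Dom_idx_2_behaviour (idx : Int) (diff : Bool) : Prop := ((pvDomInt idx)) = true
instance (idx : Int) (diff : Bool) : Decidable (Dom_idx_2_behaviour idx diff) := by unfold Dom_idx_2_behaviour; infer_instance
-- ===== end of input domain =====

-- B replaces A's per-call scan by a precomputed reverse table (one dict lookup per call); return values are proved identical.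

-- ===== PORT A =====
def pvBEHAVIOUR_LABELS : List (String × List Int) :=
  [("Groom", [0, 1, 2, 3, 5, 9]),
   ("Run", [6]),
   ("Walk", [8, 18]),
   ("CW-Turn", [7]),
   ("CCW-Turn", [10, 11]),
   ("Point", [12, 19]),
   ("Rear", [13, 15, 17]),
   ("N/A", [4, 14, 16])]

-- inner 'for i, j in enumerate(idxs): if idx == j: return f'{behaviour} #{i}''
def pvInnerA (idx : Int) : List (Int × Int) → Option Int
  | [] => none
  | (i, j) :: t => if idx = j then some i else pvInnerA idx t

-- outer 'for behaviour, idxs in BEHAVIOUR_LABELS.items(): …'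
def pvLoopA (idx : Int) (diff : Bool) : List (String × List Int) → Option String
  | [] => none
  | (b, idxs) :: rest =>
    if !diff then
      if idxs.contains idx then some b else pvLoopA idx diff rest
    else
      match pvInnerA idx (PySem.List.enumerate idxs) with
      | some i => some (b ++ " #" ++ PySem.Int.toStr i)
      | none => pvLoopA idx diff rest

def idx_2_behaviour (idx : Int) (diff : Bool) : Option String :=
  pvLoopA idx diff pvBEHAVIOUR_LABELS

-- ===== PORT B =====
-- REVERSE = {j: (behaviour, i) for behaviour, idxs in BEHAVIOUR_LABELS.items() for i, j in enumerate(idxs)}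
def pvREVERSE : PySem.Dict Int (String × Int) :=
  PySem.Dict.ofList
    (pvBEHAVIOUR_LABELS.flatMap fun p =>
      (PySem.List.enumerate p.2).map fun q => (q.2, (p.1, q.1)))

def idx_2_behaviour_alt (idx : Int) (diff : Bool) : Option String :=
  match pvREVERSE.get? idx with
  | none => none
  | some (behaviour, i) =>
    some (if diff then behaviour ++ " #" ++ PySem.Int.toStr i else behaviour)

-- ===== PRECONDITION & SPEC =====
def Spec_idx_2_behaviour (idx : Int) (diff : Bool) (out : Option String) : Prop := out = idx_2_behaviour_alt idx diff
instance (idx : Int) (diff : Bool) (out : Option String) : Decidable (Spec_idx_2_behaviour idx diff out) := by unfold Spec_idx_2_behaviour; infer_instance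

-- ===== CLAIM (what is proved, stated in full; the proofs are below) =====
def Claim_equal_idx_2_behaviour : Prop := ∀ (idx : Int) (diff : Bool), Dom_idx_2_behaviour idx diff → Spec_idx_2_behaviour idx diff (idx_2_behaviour idx diff)

-- ===== LEMMAS AND PROOFS =====

theorem pvA_none (idx : Int) (h : idx < 0 ∨ 20 ≤ idx) (diff : Bool) :
    idx_2_behaviour idx diff = none := by
  have h0 : idx ≠ 0 := by omega
  have h1 : idx ≠ 1 := by omega
  have h2 : idx ≠ 2 := by omega
  have h3 : idx ≠ 3 := by omega
  have h4 : idx ≠ 4 := by omega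
  have h5 : idx ≠ 5 := by omega
  have h6 : idx ≠ 6 := by omega
  have h7 : idx ≠ 7 := by omega
  have h8 : idx ≠ 8 := by omega
  have h9 : idx ≠ 9 := by omega
  have h10 : idx ≠ 10 := by omega
  have h11 : idx ≠ 11 := by omega
  have h12 : idx ≠ 12 := by omega
  have h13 : idx ≠ 13 := by omega
  have h14 : idx ≠ 14 := by omega
  have h15 : idx ≠ 15 := by omega
  have h16 : idx ≠ 16 := by omega
  have h17 : idx ≠ 17 := by omega
  have h18 : idx ≠ 18 := by omega
  have h19 : idx ≠ 19 := by omega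
  cases diff <;>
    simp [idx_2_behaviour, pvBEHAVIOUR_LABELS, pvLoopA, pvInnerA,
      PySem.List.enumerate, h0, h1, h2, h3, h4, h5, h6, h7, h8, h9,
      h10, h11, h12, h13, h14, h15, h16, h17, h18, h19]

theorem pvB_none (idx : Int) (h : idx < 0 ∨ 20 ≤ idx) (diff : Bool) :
    idx_2_behaviour_alt idx diff = none := by
  have h0 : (((0:Int)) == idx) = false := by simp; omega
  have h1 : (((1:Int)) == idx) = false := by simp; omega
  have h2 : (((2:Int)) == idx) = false := by simp; omega
  have h3 : (((3:Int)) == idx) = false := by simp; omega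
  have h4 : (((4:Int)) == idx) = false := by simp; omega
  have h5 : (((5:Int)) == idx) = false := by simp; omega
  have h6 : (((6:Int)) == idx) = false := by simp; omega
  have h7 : (((7:Int)) == idx) = false := by simp; omega
  have h8 : (((8:Int)) == idx) = false := by simp; omega
  have h9 : (((9:Int)) == idx) = false := by simp; omega
  have h10 : (((10:Int)) == idx) = false := by simp; omega
  have h11 : (((11:Int)) == idx) = false := by simp; omega
  have h12 : (((12:Int)) == idx) = false := by simp; omega
  have h13 : (((13:Int)) == idx) = false := by simp; omega
  have h14 : (((14:Int)) == idx) = false := by simp; omega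
  have h15 : (((15:Int)) == idx) = false := by simp; omega
  have h16 : (((16:Int)) == idx) = false := by simp; omega
  have h17 : (((17:Int)) == idx) = false := by simp; omega
  have h18 : (((18:Int)) == idx) = false := by simp; omega
  have h19 : (((19:Int)) == idx) = false := by simp; omega
  have hR : pvREVERSE.items = [((0:Int), ("Groom", (0:Int))), (1, ("Groom", 1)), (2, ("Groom", 2)), (3, ("Groom", 3)), (5, ("Groom", 4)), (9, ("Groom", 5)), (6, ("Run", 0)), (8, ("Walk", 0)), (18, ("Walk", 1)), (7, ("CW-Turn", 0)), (10, ("CCW-Turn", 0)), (11, ("CCW-Turn", 1)), (12, ("Point", 0)), (19, ("Point", 1)), (13, ("Rear", 0)), (15, ("Rear", 1)), (17, ("Rear", 2)), (4, ("N/A", 0)), (14, ("N/A", 1)), (16, ("N/A", 2))] := by decide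
  simp [idx_2_behaviour_alt, PySem.Dict.get?, hR, List.find?,
    h0, h1, h2, h3, h4, h5, h6, h7, h8, h9,
    h10, h11, h12, h13, h14, h15, h16, h17, h18, h19]

-- ===== VERDICT (by name: the statement is the Claim_ definition above) =====
theorem idx_2_behaviour_spec : Claim_equal_idx_2_behaviour := by
  intro idx diff _
  unfold Spec_idx_2_behaviour
  by_cases h : 0 ≤ idx ∧ idx < 20
  · obtain ⟨hl, hu⟩ := h
    interval_cases idx <;> cases diff <;> rfl
  · rw [pvA_none idx (by omega), pvB_none idx (by omega)]
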